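-- pv_equiv track=rewrite | github.com/tim-parisi/theory-of-computing-project1 | graph_results_tparisi.py | find_max_line
-- ===== SOURCE A (Python) =====
-- def find_max_line(Xt, Yt, Xf, Yf):
--     X_both = Xt + Xf
--     Y_both = Yt + Yf
--     times = {}
--     for it in range(len(X_both)):
--         if times.get(X_both[it], 0) < Y_both[it]:
--             times[X_both[it]] = Y_both[it]
--     time_keys_sorted = sorted(times, key=lambda x: x)
--     max_X = []
--     max_Y = []
--     for ix in range(len(time_keys_sorted)):
--         key = time_keys_sorted[ix]
--         if time_keys_sorted[ix] < 2:
--             continue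
--         max_X.append(key)
--         max_Y.append(times[key])
--
--     return max_X, max_Y
-- ===== SOURCE B (Python) =====
-- def find_max_line(Xt, Yt, Xf, Yf):
--     # build the aligned (x, y) pairs by index, then filter -> sort by X -> one grouped
--     # scan tracking the running max per X (raises IndexError like A on mismatched lengths)
--     X_both = Xt + Xf
--     Y_both = Yt + Yf
--     pairs0 = [(X_both[i], Y_both[i]) for i in range(len(X_both))]
--     pairs = sorted((p for p in pairs0 if p[0] >= 2 and p[1] > 0), key=lambda p: p[0])
--     max_X = []
--     max_Y = []
--     for x, y in pairs:
--         if max_X and max_X[-1] == x: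
--             if max_Y[-1] < y:
--                 max_Y[-1] = y
--         else:
--             max_X.append(x)
--             max_Y.append(y)
--     return max_X, max_Y
-- ===== Notes on version B (the rewrite author's own statement) =====
-- stated objective: alternative
-- what changed: Replaces the dict of running maxima plus a key sort by a filter (x>=2, y>0), a sort of the surviving (x,y) pairs by x, and one grouped scan that keeps the running max per x group.
import Mathlib
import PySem

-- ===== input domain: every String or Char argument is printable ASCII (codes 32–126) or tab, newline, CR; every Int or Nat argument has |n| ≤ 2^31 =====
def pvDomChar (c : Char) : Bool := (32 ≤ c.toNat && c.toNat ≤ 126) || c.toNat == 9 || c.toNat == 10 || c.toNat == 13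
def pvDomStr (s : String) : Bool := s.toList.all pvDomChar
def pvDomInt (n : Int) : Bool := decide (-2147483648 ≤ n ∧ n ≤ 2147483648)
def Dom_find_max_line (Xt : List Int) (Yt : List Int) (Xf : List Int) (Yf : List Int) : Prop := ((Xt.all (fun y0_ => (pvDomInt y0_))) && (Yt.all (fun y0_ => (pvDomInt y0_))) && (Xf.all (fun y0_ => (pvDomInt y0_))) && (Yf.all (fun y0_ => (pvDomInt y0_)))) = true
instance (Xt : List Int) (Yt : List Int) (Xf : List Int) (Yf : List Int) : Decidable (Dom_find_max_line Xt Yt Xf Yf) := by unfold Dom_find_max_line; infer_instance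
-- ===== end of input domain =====

-- B replaces A's dict of running maxima + key sort by filter → sort-by-x → one grouped scan (objective: alternative decomposition, same result).

-- ===== PORT A =====
-- A-side helper: the body of A's dict loop ('if times.get(x,0) < y: times[x] = y')
def stepA (d : PySem.Dict Int Int) (x y : Int) : PySem.Dict Int Int :=
  if d.getD x 0 < y then d.insert x y else d

-- A-side helper: the body of A's output loop ('if key < 2: continue; append key / times[key]');
-- times[key] is only read for key ∈ times, where getD key 0 = the stored value
def stepK (times : PySem.Dict Int Int) (acc : List Int × List Int) (key : Int) : List Int × List Int :=
  if key < 2 then acc else (acc.1 ++ [key], acc.2 ++ [times.getD key 0])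

def find_max_line (Xt : List Int) (Yt : List Int) (Xf : List Int) (Yf : List Int) : List Int × List Int :=
  let X_both := Xt ++ Xf
  let Y_both := Yt ++ Yf
  let times := (PySem.List.pyRange 0 (X_both.length : Int)).foldl
    (fun d it => stepA d (PySem.List.pyGetD X_both it 0) (PySem.List.pyGetD Y_both it 0))
    PySem.Dict.empty
  let time_keys_sorted := PySem.List.sorted times.keys (fun x => x) false
  (PySem.List.pyRange 0 (time_keys_sorted.length : Int)).foldl
    (fun acc ix => stepK times acc (PySem.List.pyGetD time_keys_sorted ix 0)) ([], [])

-- ===== PORT B =====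
-- B-side helper: the body of B's grouped scan; 'max_Y[-1] = y' is acc.2.dropLast ++ [y]
-- (exact: acc.2 is nonempty whenever that branch is taken, since acc.1 is)
def stepB (acc : List Int × List Int) (p : Int × Int) : List Int × List Int :=
  if acc.1.getLast? == some p.1 then
    (if acc.2.getLast?.getD 0 < p.2 then (acc.1, acc.2.dropLast ++ [p.2]) else acc)
  else (acc.1 ++ [p.1], acc.2 ++ [p.2])

def find_max_line_alt (Xt : List Int) (Yt : List Int) (Xf : List Int) (Yf : List Int) : List Int × List Int :=
  let X_both := Xt ++ Xf
  let Y_both := Yt ++ Yf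
  -- '[(X_both[i], Y_both[i]) for i in range(len(X_both))]'
  let pairs0 := (PySem.List.pyRange 0 (X_both.length : Int)).foldl
    (fun acc i => acc ++ [(PySem.List.pyGetD X_both i 0, PySem.List.pyGetD Y_both i 0)]) []
  let pairs := PySem.List.sorted
    (pairs0.filter (fun p => decide (2 ≤ p.1) && decide (0 < p.2)))
    (fun p => p.1) false
  pairs.foldl stepB ([], [])

-- ===== PRECONDITION & SPEC =====
-- A indexes Y_both with every index of X_both, so it raises IndexError when the X lists
-- are jointly longer than the Y lists (B raises there too); exactly those inputs are excluded.
def Pre_find_max_line (Xt : List Int) (Yt : List Int) (Xf : List Int) (Yf : List Int) : Prop :=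
  Xt.length + Xf.length ≤ Yt.length + Yf.length
instance (Xt : List Int) (Yt : List Int) (Xf : List Int) (Yf : List Int) : Decidable (Pre_find_max_line Xt Yt Xf Yf) := by unfold Pre_find_max_line; infer_instance
def pvWitness_find_max_line : List Int × List Int × List Int × List Int := ([2, 3, 2], [1, 5, 2], [4], [7])

def Spec_find_max_line (Xt : List Int) (Yt : List Int) (Xf : List Int) (Yf : List Int) (out : List Int × List Int) : Prop := out = find_max_line_alt Xt Yt Xf Yf
instance (Xt : List Int) (Yt : List Int) (Xf : List Int) (Yf : List Int) (out : List Int × List Int) : Decidable (Spec_find_max_line Xt Yt Xf Yf out) := by unfold Spec_find_max_line; infer_instance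

-- ===== CLAIM (what is proved, stated in full; the proofs are below) =====
def Claim_equal_find_max_line : Prop := ∀ (Xt : List Int) (Yt : List Int) (Xf : List Int) (Yf : List Int), Dom_find_max_line Xt Yt Xf Yf → Pre_find_max_line Xt Yt Xf Yf → Spec_find_max_line Xt Yt Xf Yf (find_max_line Xt Yt Xf Yf)

-- ===== LEMMAS AND PROOFS =====

-- the strictly increasing list of group keys of a list sorted by first component
def groupKeys : List (Int × Int) → List Int
  | [] => []
  | p :: rest => p.1 :: groupKeys (rest.dropWhile (fun q => q.1 == p.1))
termination_by l => l.length
decreasing_by simpa using Nat.lt_succ_of_le (List.length_dropWhile_le _ _)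

-- the maximum second component among pairs with first component x (0 if there are none)
def gmaxP (x : Int) (S : List (Int × Int)) : Int :=
  match (S.filter (fun p => p.1 == x)).map (·.2) with
  | [] => 0
  | y :: t => t.foldl max y

-- A's indexed loop over two lists is the fold over their zip
theorem zip_loop {β : Type} (X Y : List Int) (g : β → Int → Int → β) (init : β)
    (h : X.length ≤ Y.length) :
    (PySem.List.pyRange 0 (X.length : Int)).foldl
      (fun d it => g d (PySem.List.pyGetD X it 0) (PySem.List.pyGetD Y it 0)) init
      = (X.zip Y).foldl (fun d p => g d p.1 p.2) init := by
  have hlen : (X.zip Y).length = X.length := by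
    rw [List.length_zip]; omega
  have hcast : ((X.zip Y).length : Int) = (X.length : Int) := by exact_mod_cast hlen
  calc (PySem.List.pyRange 0 (X.length : Int)).foldl
        (fun d it => g d (PySem.List.pyGetD X it 0) (PySem.List.pyGetD Y it 0)) init
      = (PySem.List.pyRange 0 ((X.zip Y).length : Int)).foldl
        (fun d it => (fun (d : β) (p : Int × Int) => g d p.1 p.2) d
          (PySem.List.pyGetD (X.zip Y) it (0, 0))) init := by
        rw [hcast]
        apply PySem.List.foldl_congr_mem
        intro acc it hit
        rw [PySem.List.mem_pyRange_one] at hit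
        obtain ⟨h0, h1⟩ := hit
        have hy : it < (Y.length : Int) := by
          have : (X.length : Int) ≤ (Y.length : Int) := by exact_mod_cast h
          omega
        have hz : it < ((X.zip Y).length : Int) := by rw [hcast]; exact h1
        rw [PySem.List.pyGetD_eq_getElem X 0 h0 h1, PySem.List.pyGetD_eq_getElem Y 0 h0 hy,
            PySem.List.pyGetD_eq_getElem (X.zip Y) (0, 0) h0 hz, List.getElem_zip]
    _ = (X.zip Y).foldl (fun d p => g d p.1 p.2) init :=
        PySem.List.foldl_pyRange_zero_pyGetD' (X.zip Y) (0, 0) (fun d p => g d p.1 p.2) init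

-- folding snoc rebuilds the list
theorem foldl_snoc {α : Type} (l a : List α) :
    l.foldl (fun acc p => acc ++ [p]) a = a ++ l := by
  induction l generalizing a with
  | nil => simp
  | cons x t ih => simp [List.foldl_cons, ih]

-- value invariant of A's dict loop
theorem timesA_getD (P : List (Int × Int)) (d : PySem.Dict Int Int) (x : Int) :
    (P.foldl (fun d p => stepA d p.1 p.2) d).getD x 0
      = P.foldl (fun m p => if p.1 = x then max m p.2 else m) (d.getD x 0) := by
  induction P generalizing d with
  | nil => rfl
  | cons p T ih =>
    simp only [List.foldl_cons]
    rw [ih]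
    have hkey : (stepA d p.1 p.2).getD x 0
        = if p.1 = x then max (d.getD x 0) p.2 else d.getD x 0 := by
      unfold stepA
      by_cases hx : p.1 = x
      · rw [if_pos hx]
        subst hx
        by_cases hlt : d.getD p.1 0 < p.2
        · rw [if_pos hlt, PySem.Dict.getD_insert, if_pos rfl, max_eq_right (le_of_lt hlt)]
        · rw [if_neg hlt, max_eq_left (by omega)]
      · rw [if_neg hx]
        by_cases hlt : d.getD p.1 0 < p.2
        · rw [if_pos hlt, PySem.Dict.getD_insert, if_neg (fun hc => hx hc.symm)]
        · rw [if_neg hlt]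
    rw [hkey]

-- key-membership invariant of A's dict loop
theorem timesA_mem_keys (P : List (Int × Int)) (d : PySem.Dict Int Int) (x : Int) :
    x ∈ (P.foldl (fun d p => stepA d p.1 p.2) d).keys
      ↔ x ∈ d.keys ∨ ∃ y, (x, y) ∈ P ∧ d.getD x 0 < y := by
  induction P generalizing d with
  | nil => simp
  | cons p T ih =>
    obtain ⟨a, b⟩ := p
    simp only [List.foldl_cons]
    rw [ih]
    by_cases hx : x = a
    · subst hx
      unfold stepA
      split_ifs with hlt
      · constructor
        · intro _
          exact Or.inr ⟨b, List.mem_cons_self .., hlt⟩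
        · intro _
          exact Or.inl (by rw [PySem.Dict.mem_keys_insert]; exact Or.inl rfl)
      · constructor
        · rintro (hk | ⟨y, hyT, hylt⟩)
          · exact Or.inl hk
          · exact Or.inr ⟨y, List.mem_cons_of_mem _ hyT, hylt⟩
        · rintro (hk | ⟨y, hy, hylt⟩)
          · exact Or.inl hk
          · rcases List.mem_cons.mp hy with heq | hyT
            · exfalso; apply hlt
              have : y = b := by simpa using congrArg Prod.snd heq
              omega
            · exact Or.inr ⟨y, hyT, hylt⟩
    · have h1 : (x ∈ (stepA d a b).keys) ↔ x ∈ d.keys := by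
        unfold stepA; split_ifs
        · rw [PySem.Dict.mem_keys_insert]; tauto
        · rfl
      have h2 : (stepA d a b).getD x 0 = d.getD x 0 := by
        unfold stepA; split_ifs
        · rw [PySem.Dict.getD_insert, if_neg hx]
        · rfl
      rw [h1, h2]
      constructor
      · rintro (hk | ⟨y, hyT, hylt⟩)
        · exact Or.inl hk
        · exact Or.inr ⟨y, List.mem_cons_of_mem _ hyT, hylt⟩
      · rintro (hk | ⟨y, hy, hylt⟩)
        · exact Or.inl hk
        · rcases List.mem_cons.mp hy with heq | hyT
          · exfalso; exact hx (by simpa using congrArg Prod.fst heq)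
          · exact Or.inr ⟨y, hyT, hylt⟩

theorem timesA_nodup (P : List (Int × Int)) (d : PySem.Dict Int Int) (h : d.keys.Nodup) :
    (P.foldl (fun d p => stepA d p.1 p.2) d).keys.Nodup := by
  induction P generalizing d with
  | nil => exact h
  | cons p T ih =>
    simp only [List.foldl_cons]
    apply ih
    unfold stepA
    split_ifs
    · exact PySem.Dict.nodup_keys_insert d p.1 p.2 h
    · exact h

theorem foldl_if_max (P : List (Int × Int)) (x m : Int) :
    P.foldl (fun m p => if p.1 = x then max m p.2 else m) m
      = ((P.filter (fun p => p.1 == x)).map (·.2)).foldl max m := by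
  induction P generalizing m with
  | nil => rfl
  | cons p T ih =>
    simp only [List.foldl_cons, List.filter_cons]
    by_cases hx : p.1 = x
    · simp only [hx, BEq.rfl, if_true, List.map_cons, List.foldl_cons]
      exact ih (max m p.2)
    · simp only [if_neg hx, beq_eq_false_iff_ne.mpr hx]
      exact ih m

theorem foldl_max_filter_pos (l : List Int) (a : Int) (h : 0 ≤ a) :
    l.foldl max a = (l.filter (fun y => decide (0 < y))).foldl max a := by
  induction l generalizing a with
  | nil => rfl
  | cons y t ih =>
    simp only [List.foldl_cons, List.filter_cons]
    by_cases hy : 0 < y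
    · simp only [decide_eq_true hy, if_true, List.foldl_cons]
      exact ih (max a y) (le_trans h (le_max_left a y))
    · simp only [decide_eq_false hy, Bool.false_eq_true, if_false]
      rw [max_eq_left (by omega)]
      exact ih a h

theorem foldK (times : PySem.Dict Int Int) (tks : List Int) (a b : List Int) :
    tks.foldl (stepK times) (a, b)
      = (a ++ tks.filter (fun k => decide (2 ≤ k)),
         b ++ (tks.filter (fun k => decide (2 ≤ k))).map (fun k => times.getD k 0)) := by
  induction tks generalizing a b with
  | nil => simp
  | cons k t ih =>
    rw [List.foldl_cons, List.filter_cons]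
    by_cases hk : k < 2
    · have hstep : stepK times (a, b) k = (a, b) := by unfold stepK; rw [if_pos hk]
      rw [hstep, decide_eq_false (by omega : ¬ (2:Int) ≤ k), if_neg (by simp)]
      exact ih a b
    · have hstep : stepK times (a, b) k = (a ++ [k], b ++ [times.getD k 0]) := by
        unfold stepK; rw [if_neg hk]
      rw [hstep, decide_eq_true (by omega : (2:Int) ≤ k), if_pos rfl, ih]
      simp

-- B's scan over a group with a constant key takes the running max
theorem foldB_group (G : List (Int × Int)) (x : Int) (K0 V0 : List Int) (v : Int)
    (h : ∀ p ∈ G, p.1 = x) :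
    G.foldl stepB (K0 ++ [x], V0 ++ [v]) = (K0 ++ [x], V0 ++ [(G.map (·.2)).foldl max v]) := by
  induction G generalizing v with
  | nil => simp
  | cons p T ih =>
    have hp1 : p.1 = x := h p (List.mem_cons_self ..)
    have htail : ∀ q ∈ T, q.1 = x := fun q hq => h q (List.mem_cons_of_mem _ hq)
    have hstep : stepB (K0 ++ [x], V0 ++ [v]) p = (K0 ++ [x], V0 ++ [max v p.2]) := by
      unfold stepB
      have hc : ((K0 ++ [x]).getLast? == some p.1) = true := by
        rw [List.getLast?_concat, hp1]; simp
      rw [if_pos hc]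
      by_cases hlt : v < p.2
      · have hv : ((V0 ++ [v]).getLast?.getD 0) = v := by rw [List.getLast?_concat]; rfl
        rw [hv, if_pos hlt, List.dropLast_concat, max_eq_right (le_of_lt hlt)]
      · have hv : ((V0 ++ [v]).getLast?.getD 0) = v := by rw [List.getLast?_concat]; rfl
        rw [hv, if_neg hlt, max_eq_left (by omega)]
    rw [List.foldl_cons, hstep, ih (max v p.2) htail]
    simp

-- B's scan never touches a finished prefix
theorem foldB_shift (S : List (Int × Int)) (K1 V1 K0 V0 : List Int)
    (hK : K1 ≠ []) (hV : V1 ≠ []) :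
    S.foldl stepB (K0 ++ K1, V0 ++ V1)
      = (K0 ++ (S.foldl stepB (K1, V1)).1, V0 ++ (S.foldl stepB (K1, V1)).2) := by
  induction S generalizing K1 V1 with
  | nil => simp
  | cons p T ih =>
    have hKlast : (K0 ++ K1).getLast? = K1.getLast? := by
      rw [List.getLast?_append]
      obtain ⟨k, hk⟩ := List.exists_mem_of_ne_nil K1 hK
      cases hkl : K1.getLast? with
      | none => exact absurd (List.getLast?_eq_none_iff.mp hkl) hK
      | some _ => rfl
    have hVlast : (V0 ++ V1).getLast? = V1.getLast? := by
      rw [List.getLast?_append]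
      cases hvl : V1.getLast? with
      | none => exact absurd (List.getLast?_eq_none_iff.mp hvl) hV
      | some _ => rfl
    have hstep : stepB (K0 ++ K1, V0 ++ V1) p
        = (K0 ++ (stepB (K1, V1) p).1, V0 ++ (stepB (K1, V1) p).2)
        ∧ (stepB (K1, V1) p).1 ≠ [] ∧ (stepB (K1, V1) p).2 ≠ [] := by
      unfold stepB
      cases hc : (K1.getLast? == some p.1) with
      | false =>
        simp only [hKlast, hc, Bool.false_eq_true, if_false]
        refine ⟨by simp [List.append_assoc], by simp, by simp⟩
      | true =>
        simp only [hKlast, hVlast, hc, if_true]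
        by_cases hlt : V1.getLast?.getD 0 < p.2
        · rw [if_pos hlt, if_pos hlt]
          have hdl : (V0 ++ V1).dropLast = V0 ++ V1.dropLast := by
            rw [List.dropLast_append, if_neg (by simpa using hV)]
          refine ⟨by simp [hdl, List.append_assoc], hK, by simp⟩
        · rw [if_neg hlt, if_neg hlt]
          exact ⟨rfl, hK, hV⟩
    rw [List.foldl_cons, List.foldl_cons, hstep.1]
    exact ih _ _ hstep.2.1 hstep.2.2

theorem foldB_start (p : Int × Int) (S' : List (Int × Int)) (K0 V0 : List Int)
    (hne : K0.getLast? ≠ some p.1) :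
    (p :: S').foldl stepB (K0, V0)
      = (K0 ++ ((p :: S').foldl stepB ([], [])).1, V0 ++ ((p :: S').foldl stepB ([], [])).2) := by
  have h1 : stepB (K0, V0) p = (K0 ++ [p.1], V0 ++ [p.2]) := by
    unfold stepB
    rw [if_neg (by simpa using hne)]
  have h2 : stepB ([], []) p = ([p.1], [p.2]) := by
    unfold stepB; simp
  rw [List.foldl_cons, List.foldl_cons, h1, h2]
  exact foldB_shift S' [p.1] [p.2] K0 V0 (by simp) (by simp)

theorem mem_groupKeys_sub (S : List (Int × Int)) : ∀ x ∈ groupKeys S, x ∈ S.map (·.1) := by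
  induction S using groupKeys.induct with
  | case1 => simp [groupKeys]
  | case2 p rest ih =>
    intro x hx
    rw [groupKeys] at hx
    rcases List.mem_cons.mp hx with h | h
    · simp [h]
    · have hR := ih x h
      have hsub : ((rest.dropWhile (fun q => q.1 == p.1)).map (·.1)).Sublist (rest.map (·.1)) :=
        (List.dropWhile_sublist _).map _
      have : x ∈ rest.map (·.1) := hsub.mem hR
      simp only [List.map_cons, List.mem_cons]
      exact Or.inr this

theorem dropWhile_gt (p : Int × Int) (rest : List (Int × Int))
    (h2 : ∀ q ∈ rest, p.1 ≤ q.1) (hp : rest.Pairwise (fun a b => a.1 ≤ b.1)) :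
    ∀ q ∈ rest.dropWhile (fun q => q.1 == p.1), p.1 < q.1 := by
  intro q hq
  cases hR : rest.dropWhile (fun q => q.1 == p.1) with
  | nil => rw [hR] at hq; simp at hq
  | cons r R' =>
    have hrhead : (r.1 == p.1) = false := by
      have hh := List.head?_dropWhile_not (fun q => q.1 == p.1) rest
      rw [hR] at hh
      simpa using hh
    have hr_mem : r ∈ rest := (List.dropWhile_sublist _).mem (hR ▸ List.mem_cons_self ..)
    have hpr : p.1 < r.1 :=
      lt_of_le_of_ne (h2 r hr_mem) (fun hc => by simp [hc] at hrhead)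
    rw [hR] at hq
    rcases List.mem_cons.mp hq with rfl | hq'
    · exact hpr
    · have hPd : (rest.dropWhile (fun q => q.1 == p.1)).Pairwise (fun a b => a.1 ≤ b.1) :=
        List.Pairwise.sublist (List.dropWhile_sublist _) hp
      rw [hR] at hPd
      have : r.1 ≤ q.1 := (List.pairwise_cons.mp hPd).1 q hq'
      omega

theorem mem_groupKeys (S : List (Int × Int)) :
    S.Pairwise (fun a b => a.1 ≤ b.1) → ∀ x : Int, (x ∈ groupKeys S ↔ x ∈ S.map (·.1)) := by
  induction S using groupKeys.induct with
  | case1 => simp [groupKeys]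
  | case2 p rest ih =>
    intro hs x
    obtain ⟨hhead, hrest⟩ := List.pairwise_cons.mp hs
    constructor
    · exact mem_groupKeys_sub _ x
    · intro hx
      rw [groupKeys]
      rcases List.mem_cons.mp hx with h | h
      · simp [h]
      · obtain ⟨q, hq, hqx⟩ := List.mem_map.mp h
        rw [← List.takeWhile_append_dropWhile (p := fun q => q.1 == p.1) (l := rest)] at hq
        rcases List.mem_append.mp hq with hqG | hqR
        · have : q.1 = p.1 := by simpa using List.mem_takeWhile_imp hqG
          rw [List.mem_cons]
          exact Or.inl (by omega)
        · have hRp : (rest.dropWhile (fun q => q.1 == p.1)).Pairwise (fun a b => a.1 ≤ b.1) :=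
            List.Pairwise.sublist (List.dropWhile_sublist _) hrest
          have : x ∈ groupKeys (rest.dropWhile (fun q => q.1 == p.1)) :=
            (ih hRp x).mpr (List.mem_map.mpr ⟨q, hqR, hqx⟩)
          exact List.mem_cons_of_mem _ this

theorem groupKeys_pairwise (S : List (Int × Int)) :
    S.Pairwise (fun a b => a.1 ≤ b.1) → (groupKeys S).Pairwise (· < ·) := by
  induction S using groupKeys.induct with
  | case1 => intro _; simp [groupKeys]
  | case2 p rest ih =>
    intro hs
    obtain ⟨hhead, hrest⟩ := List.pairwise_cons.mp hs
    have hRp : (rest.dropWhile (fun q => q.1 == p.1)).Pairwise (fun a b => a.1 ≤ b.1) :=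
      List.Pairwise.sublist (List.dropWhile_sublist _) hrest
    rw [groupKeys]
    rw [List.pairwise_cons]
    refine ⟨?_, ih hRp⟩
    intro y hy
    obtain ⟨q, hq, hqy⟩ := List.mem_map.mp (mem_groupKeys_sub _ y hy)
    have := dropWhile_gt p rest hhead hrest q hq
    omega

-- the main characterisation of B's grouped scan on a list sorted by first component
theorem foldB_sorted (S : List (Int × Int)) :
    S.Pairwise (fun a b => a.1 ≤ b.1) →
    S.foldl stepB ([], []) = (groupKeys S, (groupKeys S).map (fun x => gmaxP x S)) := by
  induction S using groupKeys.induct with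
  | case1 => intro _; simp [groupKeys]
  | case2 p rest ih =>
    intro hs
    obtain ⟨hhead, hrest⟩ := List.pairwise_cons.mp hs
    have hGR : rest.takeWhile (fun q => q.1 == p.1) ++ rest.dropWhile (fun q => q.1 == p.1) = rest :=
      List.takeWhile_append_dropWhile
    have hGkey : ∀ q ∈ rest.takeWhile (fun q => q.1 == p.1), q.1 = p.1 :=
      fun q hq => by simpa using List.mem_takeWhile_imp hq
    have hRgt : ∀ q ∈ rest.dropWhile (fun q => q.1 == p.1), p.1 < q.1 :=
      dropWhile_gt p rest hhead hrest
    have hRp : (rest.dropWhile (fun q => q.1 == p.1)).Pairwise (fun a b => a.1 ≤ b.1) :=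
      List.Pairwise.sublist (List.dropWhile_sublist _) hrest
    have hstep0 : stepB ([], []) p = ([p.1], [p.2]) := by unfold stepB; simp
    have hgrp := foldB_group (rest.takeWhile (fun q => q.1 == p.1)) p.1 [] [] p.2 hGkey
    simp only [List.nil_append] at hgrp
    have hfiltG : (rest.takeWhile (fun q => q.1 == p.1)).filter (fun q => q.1 == p.1)
        = rest.takeWhile (fun q => q.1 == p.1) :=
      List.filter_eq_self.mpr (fun q hq => by simpa using hGkey q hq)
    have hfiltR : (rest.dropWhile (fun q => q.1 == p.1)).filter (fun q => q.1 == p.1) = [] :=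
      List.filter_eq_nil_iff.mpr (fun q hq => by
        have := hRgt q hq
        simp only [beq_iff_eq]
        omega)
    have hfilt_rest : rest.filter (fun q => q.1 == p.1) = rest.takeWhile (fun q => q.1 == p.1) := by
      conv_lhs => rw [← hGR]
      rw [List.filter_append, hfiltG, hfiltR, List.append_nil]
    have hgmaxhead : gmaxP p.1 (p :: rest)
        = ((rest.takeWhile (fun q => q.1 == p.1)).map (·.2)).foldl max p.2 := by
      unfold gmaxP
      rw [List.filter_cons, if_pos (by simp), hfilt_rest, List.map_cons]
    have hkeys : groupKeys (p :: rest) = p.1 :: groupKeys (rest.dropWhile (fun q => q.1 == p.1)) := by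
      rw [groupKeys]
    have hfold : rest.foldl stepB ([p.1], [p.2])
        = (rest.dropWhile (fun q => q.1 == p.1)).foldl stepB
            ([p.1], [((rest.takeWhile (fun q => q.1 == p.1)).map (·.2)).foldl max p.2]) := by
      conv_lhs => rw [← hGR]
      rw [List.foldl_append, hgrp]
    rw [List.foldl_cons, hstep0, hfold, hkeys]
    cases hR : rest.dropWhile (fun q => q.1 == p.1) with
    | nil =>
      rw [List.foldl_nil]
      simp [groupKeys, hgmaxhead]
    | cons r R' =>
      rw [hR] at ih hRp hRgt
      have hne : ([p.1] : List Int).getLast? ≠ some r.1 := by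
        have hlt := hRgt r (List.mem_cons_self ..)
        intro hc
        rw [List.getLast?_singleton, Option.some.injEq] at hc
        omega
      rw [foldB_start r R' [p.1] [((rest.takeWhile (fun q => q.1 == p.1)).map (·.2)).foldl max p.2]
        hne, ih hRp]
      have htail : ∀ x ∈ groupKeys (r :: R'), gmaxP x (r :: R') = gmaxP x (p :: rest) := by
        intro x hx
        obtain ⟨q, hq, hqx⟩ := List.mem_map.mp (mem_groupKeys_sub _ x hx)
        have hxgt : p.1 < x := by have := hRgt q hq; omega
        unfold gmaxP
        have hfx : (p :: rest).filter (fun q => q.1 == x) = (r :: R').filter (fun q => q.1 == x) := by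
          rw [List.filter_cons, if_neg (by simp only [beq_iff_eq]; omega)]
          conv_lhs => rw [← hGR]
          rw [List.filter_append, hR]
          have hGnil : (rest.takeWhile (fun q => q.1 == p.1)).filter (fun q => q.1 == x) = [] :=
            List.filter_eq_nil_iff.mpr (fun q' hq' => by
              have := hGkey q' hq'
              simp only [beq_iff_eq]
              omega)
          rw [hGnil, List.nil_append]
        rw [hfx]
      have hmap : (groupKeys (r :: R')).map (fun x => gmaxP x (r :: R'))
          = (groupKeys (r :: R')).map (fun x => gmaxP x (p :: rest)) :=
        List.map_congr_left htail
      rw [hmap]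
      simp [hgmaxhead]

-- ===== VERDICT (by name: the statement is the Claim_ definition above) =====
theorem find_max_line_spec : Claim_equal_find_max_line := by
  intro Xt Yt Xf Yf _ hPre
  unfold Pre_find_max_line at hPre
  unfold Spec_find_max_line
  simp only [find_max_line, find_max_line_alt]
  set X := Xt ++ Xf with hX
  set Y := Yt ++ Yf with hY
  have hlen : X.length ≤ Y.length := by
    rw [hX, hY]; simp only [List.length_append]; omega
  rw [zip_loop X Y stepA PySem.Dict.empty hlen]
  rw [zip_loop X Y (fun acc x y => acc ++ [(x, y)]) [] hlen]
  rw [show ((X.zip Y).foldl (fun acc p => acc ++ [(p.1, p.2)]) []) = X.zip Y by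
    rw [show (fun (acc : List (Int × Int)) (p : Int × Int) => acc ++ [(p.1, p.2)])
        = (fun acc p => acc ++ [p]) from funext (fun _ => funext (fun p => by simp))]
    rw [foldl_snoc]; simp]
  set times := (X.zip Y).foldl (fun d p => stepA d p.1 p.2) PySem.Dict.empty with htimes
  set tks := PySem.List.sorted times.keys (fun x => x) false with htks
  rw [PySem.List.foldl_pyRange_zero_pyGetD' tks 0 (stepK times) ([], [])]
  rw [foldK times tks [] []]
  simp only [List.nil_append]
  set P := (X.zip Y).filter (fun p => decide (2 ≤ p.1) && decide (0 < p.2)) with hP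
  set S := PySem.List.sorted P (fun p => p.1) false with hS
  have hSperm : S.Perm P := PySem.List.sorted_perm P (fun p => p.1) false
  have hSp : S.Pairwise (fun a b => a.1 ≤ b.1) := PySem.List.sorted_pairwise P (fun p => p.1)
  rw [foldB_sorted S hSp]
  have hkeysmem : ∀ x : Int, x ∈ times.keys ↔ ∃ y, (x, y) ∈ X.zip Y ∧ 0 < y := by
    intro x
    rw [htimes, timesA_mem_keys]
    simp [PySem.Dict.keys_empty, PySem.Dict.getD_empty]
  have hnd : times.keys.Nodup := by
    rw [htimes]; exact timesA_nodup _ _ PySem.Dict.nodup_keys_empty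
  have htksnd : tks.Nodup := (PySem.List.sorted_perm times.keys (fun x => x) false).symm.nodup hnd
  have htkslt : tks.Pairwise (· < ·) := by
    have h1 : tks.Pairwise (· ≤ ·) := by
      have := PySem.List.sorted_pairwise times.keys (fun x => x)
      simpa using this
    have h2 : tks.Pairwise (· ≠ ·) := htksnd
    exact (h1.and h2).imp (fun h => lt_of_le_of_ne h.1 h.2)
  set K := tks.filter (fun k => decide (2 ≤ k)) with hKdef
  have hKlt : K.Pairwise (· < ·) := htkslt.filter _
  have hGlt : (groupKeys S).Pairwise (· < ·) := groupKeys_pairwise S hSp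
  have hmemK : ∀ a : Int, a ∈ K ↔ (2 ≤ a ∧ ∃ y, (a, y) ∈ X.zip Y ∧ 0 < y) := by
    intro a
    rw [hKdef, List.mem_filter, htks, PySem.List.mem_sorted, hkeysmem a]
    simp [and_comm]
  have hmemG : ∀ a : Int, a ∈ groupKeys S ↔ (2 ≤ a ∧ ∃ y, (a, y) ∈ X.zip Y ∧ 0 < y) := by
    intro a
    rw [mem_groupKeys S hSp a]
    constructor
    · intro ha
      obtain ⟨q, hq, hqa⟩ := List.mem_map.mp ha
      have hqP : q ∈ P := hSperm.mem_iff.mp hq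
      rw [hP, List.mem_filter] at hqP
      obtain ⟨hq0, hpred⟩ := hqP
      simp only [Bool.and_eq_true, decide_eq_true_eq] at hpred
      refine ⟨hqa ▸ hpred.1, q.2, ?_, hpred.2⟩
      rw [← hqa]
      simpa using hq0
    · rintro ⟨ha2, y, hy, hypos⟩
      refine List.mem_map.mpr ⟨(a, y), ?_, rfl⟩
      refine hSperm.mem_iff.mpr ?_
      rw [hP, List.mem_filter]
      exact ⟨hy, by simp [ha2, hypos]⟩
  have hKG : K = groupKeys S := by
    have hperm : K.Perm (groupKeys S) :=
      (List.perm_ext_iff_of_nodup (hKlt.imp (fun h => ne_of_lt h))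
        (hGlt.imp (fun h => ne_of_lt h))).mpr
        (fun a => (hmemK a).trans (hmemG a).symm)
    exact List.Perm.eq_of_pairwise (fun a b _ _ h1 h2 => le_antisymm h1 h2)
      (hKlt.imp (fun h => le_of_lt h)) (hGlt.imp (fun h => le_of_lt h)) hperm
  have hvals : ∀ x ∈ groupKeys S, times.getD x 0 = gmaxP x S := by
    intro x hx
    obtain ⟨hx2, y0, hy0, hy0pos⟩ := (hmemG x).mp hx
    rw [htimes, timesA_getD, PySem.Dict.getD_empty, foldl_if_max, foldl_max_filter_pos _ _ le_rfl]
    have hys : (((X.zip Y).filter (fun p => p.1 == x)).map (·.2)).filter (fun y => decide (0 < y))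
        = (P.filter (fun p => p.1 == x)).map (·.2) := by
      rw [List.filter_map, List.filter_filter, hP, List.filter_filter]
      refine congrArg (List.map _) (List.filter_congr ?_)
      intro a _
      by_cases hax : a.1 = x
      · have hbeq : (a.1 == x) = true := beq_iff_eq.mpr hax
        have h2a : decide (2 ≤ a.1) = true := decide_eq_true (by omega)
        simp [hbeq, h2a, Function.comp]
      · have hbeq : (a.1 == x) = false := beq_eq_false_iff_ne.mpr hax
        simp [hbeq, Function.comp]
    rw [hys]
    have hpermys : ((S.filter (fun p => p.1 == x)).map (·.2)).Perm
        ((P.filter (fun p => p.1 == x)).map (·.2)) :=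
      (hSperm.filter _).map _
    cases hcase : (S.filter (fun p => p.1 == x)).map (·.2) with
    | nil =>
      exfalso
      have hxP : (x, y0) ∈ P := by
        rw [hP, List.mem_filter]
        exact ⟨hy0, by simp [hx2, hy0pos]⟩
      have hxS : (x, y0) ∈ S := hSperm.mem_iff.mpr hxP
      have : y0 ∈ (S.filter (fun p => p.1 == x)).map (·.2) :=
        List.mem_map.mpr ⟨(x, y0), List.mem_filter.mpr ⟨hxS, by simp⟩, rfl⟩
      rw [hcase] at this
      simp at this
    | cons y t =>
      have hypos : 0 < y := by
        have hy_mem : y ∈ (S.filter (fun p => p.1 == x)).map (·.2) := by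
          rw [hcase]; exact List.mem_cons_self ..
        obtain ⟨q, hq, hqy⟩ := List.mem_map.mp hy_mem
        have hqS : q ∈ S := (List.mem_filter.mp hq).1
        have hqP : q ∈ P := hSperm.mem_iff.mp hqS
        rw [hP, List.mem_filter] at hqP
        have := hqP.2
        simp only [Bool.and_eq_true, decide_eq_true_eq] at this
        omega
      have hgm : gmaxP x S = t.foldl max y := by
        unfold gmaxP
        rw [hcase]
      rw [hgm, ← hpermys.foldl_eq 0, hcase, List.foldl_cons,
        max_eq_right (le_of_lt hypos)]
  rw [hKG]
  simp only [Prod.mk.injEq]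
  exact ⟨trivial, List.map_congr_left hvals⟩
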